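-- pv_equiv track=rewrite | github.com/Eltonmaster/advent_of_code_2022 | 06/6.py | marker_finder
-- ===== SOURCE A (Python) =====
-- def marker_finder(string, amount):
--     a = []
--     for i in range(0, len(string)):
--         if string[i] in a:
--             a.append(string[i])
--             temp = a.index(string[i])
--             a = a[a.index(string[i])+1:]
--             continue
--         else:
--             a.append(string[i])
--
--         if len(a) < amount: continue
--         return i+1
-- ===== SOURCE B (Python) =====
-- def marker_finder(string, amount):
--     last = {}
--     start = 0
--     for i, c in enumerate(string):
--         p = last.get(c)
--         if p is not None and p >= start:
--             start = p + 1
--         last[c] = i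
--         if i - start + 1 >= amount:
--             return i + 1
-- ===== Notes on version B (the rewrite author's own statement) =====
-- stated objective: faster
-- what changed: Replaced A's explicit window list (per-character membership scan, list.index and slicing) with a last-seen-position dictionary plus a window-start index, so each character costs one dict lookup and one insert.
import Mathlib
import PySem

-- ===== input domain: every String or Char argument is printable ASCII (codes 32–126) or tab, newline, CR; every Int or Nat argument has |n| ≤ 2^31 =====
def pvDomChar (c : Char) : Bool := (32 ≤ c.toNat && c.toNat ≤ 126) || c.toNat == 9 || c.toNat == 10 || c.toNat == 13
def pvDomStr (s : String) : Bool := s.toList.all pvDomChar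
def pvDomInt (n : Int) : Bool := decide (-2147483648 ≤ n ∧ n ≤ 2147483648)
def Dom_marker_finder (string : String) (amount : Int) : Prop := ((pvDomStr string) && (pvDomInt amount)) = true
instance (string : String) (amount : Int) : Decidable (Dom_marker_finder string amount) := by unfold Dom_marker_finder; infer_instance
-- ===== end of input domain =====

-- B replaces A's list window (membership scan + list.index + slicing per step) by a
-- last-seen-position dictionary and a window start index: one dict lookup per character.

-- ===== PORT A =====
-- the for-loop over range(len(string)) as structural recursion over the characters,
-- carrying the index i and the window list a
def markerLoopA (amount : Int) : List Char → Int → List Char → Option Int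
  | [], _, _ => none
  | c :: rest, i, a =>
    if c ∈ a then
      -- a.append(string[i]); a = a[a.index(string[i])+1:]  (temp is dead; index always
      -- succeeds since c was just appended, so getD 0 is never used)
      let a2 := a ++ [c]
      let idx : Nat := (PySem.List.index? a2 c).getD 0
      markerLoopA amount rest (i + 1) (PySem.List.slice a2 (some ((idx : Int) + 1)) none)
    else
      let a2 := a ++ [c]
      if (a2.length : Int) < amount then markerLoopA amount rest (i + 1) a2
      else some (i + 1)

def marker_finder (string : String) (amount : Int) : Option Int :=
  markerLoopA amount string.toList 0 []

-- ===== PORT B =====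
def markerLoopB (amount : Int) : List Char → Int → PySem.Dict Char Int → Int → Option Int
  | [], _, _, _ => none
  | c :: rest, i, last, start =>
    let p := PySem.Dict.get? last c
    let start' := match p with
      | some p => if start ≤ p then p + 1 else start
      | none => start
    let last' := PySem.Dict.insert last c i
    if amount ≤ i - start' + 1 then some (i + 1)
    else markerLoopB amount rest (i + 1) last' start'

def marker_finder_alt (string : String) (amount : Int) : Option Int :=
  markerLoopB amount string.toList 0 PySem.Dict.empty 0

-- ===== PRECONDITION & SPEC =====
def Spec_marker_finder (string : String) (amount : Int) (out : Option Int) : Prop := out = marker_finder_alt string amount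
instance (string : String) (amount : Int) (out : Option Int) : Decidable (Spec_marker_finder string amount out) := by unfold Spec_marker_finder; infer_instance

-- ===== CLAIM (what is proved, stated in full; the proofs are below) =====
def Claim_equal_marker_finder : Prop := ∀ (string : String) (amount : Int), Dom_marker_finder string amount → Spec_marker_finder string amount (marker_finder string amount)

-- ===== LEMMAS AND PROOFS =====

-- every member of a list has a LAST occurrence index
theorem exists_last_occ {c : Char} {l : List Char} (h : c ∈ l) :
    ∃ j : Nat, l[j]? = some c ∧ ∀ k, j < k → l[k]? ≠ some c := by
  induction l using List.reverseRecOn with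
  | nil => cases h
  | append_singleton l x ih =>
    by_cases hx : c = x
    · subst hx
      exact ⟨l.length, by simp, fun k hk => by
        rw [List.getElem?_eq_none (by simp; omega)]; simp⟩
    · have hc : c ∈ l := by
        rcases List.mem_append.mp h with h' | h'
        · exact h'
        · simp at h'; exact absurd h' hx
      obtain ⟨j, hj, hlast⟩ := ih hc
      have hjlt : j < l.length := (List.getElem?_eq_some_iff.mp hj).1
      refine ⟨j, by rw [List.getElem?_append_left hjlt]; exact hj, fun k hk => ?_⟩
      by_cases hkl : k < l.length
      · rw [List.getElem?_append_left hkl]; exact hlast k hk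
      · by_cases hke : k = l.length
        · subst hke; simp; intro hcx; exact hx hcx.symm
        · rw [List.getElem?_eq_none (by simp; omega)]; simp

-- the last-seen invariant: the dict maps each char to the index of its last occurrence
def LastInv (pre : List Char) (last : PySem.Dict Char Int) : Prop :=
  ∀ ch p, PySem.Dict.get? last ch = some p ↔
    ∃ j : Nat, p = (j : Int) ∧ pre[j]? = some ch ∧ ∀ k, j < k → pre[k]? ≠ some ch

theorem lastInv_empty : LastInv [] PySem.Dict.empty := by
  intro ch p
  simp [PySem.Dict.get?_empty]

theorem lastInv_step {pre : List Char} {last : PySem.Dict Char Int} (h : LastInv pre last)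
    (c : Char) : LastInv (pre ++ [c]) (PySem.Dict.insert last c (pre.length : Int)) := by
  intro ch p
  by_cases hc : ch = c
  · subst hc
    rw [PySem.Dict.get?_insert_self]
    constructor
    · rintro ⟨rfl⟩
      exact ⟨pre.length, rfl, by simp, fun k hk => by
        rw [List.getElem?_eq_none (by simp; omega)]; simp⟩
    · rintro ⟨j, rfl, hj, hlast⟩
      have hjlt : j < pre.length + 1 := by
        have := (List.getElem?_eq_some_iff.mp hj).1; simpa using this
      have hje : j = pre.length := by
        by_contra hne
        exact hlast pre.length (by omega) (by simp)
      simp [hje]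
  · rw [PySem.Dict.get?_insert_of_ne _ _ hc]
    rw [h ch p]
    constructor
    · rintro ⟨j, rfl, hj, hlast⟩
      have hjlt : j < pre.length := (List.getElem?_eq_some_iff.mp hj).1
      refine ⟨j, rfl, by rw [List.getElem?_append_left hjlt]; exact hj, fun k hk => ?_⟩
      by_cases hkl : k < pre.length
      · rw [List.getElem?_append_left hkl]; exact hlast k hk
      · by_cases hke : k = pre.length
        · subst hke; simp; intro hcc; exact hc hcc.symm
        · rw [List.getElem?_eq_none (by simp; omega)]; simp
    · rintro ⟨j, rfl, hj, hlast⟩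
      have hjlt : j < pre.length := by
        have h1 : j < pre.length + 1 := by
          have := (List.getElem?_eq_some_iff.mp hj).1; simpa using this
        by_contra hge
        have hje : j = pre.length := by omega
        subst hje; simp at hj; exact hc hj.symm
      refine ⟨j, rfl, by rw [List.getElem?_append_left hjlt] at hj; exact hj, fun k hk hke => ?_⟩
      by_cases hkl : k < pre.length
      · exact hlast k hk (by rw [List.getElem?_append_left hkl]; exact hke)
      · rw [List.getElem?_eq_none (by omega)] at hke; simp at hke

-- main loop equivalence, by induction on the remaining characters
theorem loop_eq (amount : Int) (rest : List Char) :
    ∀ (pre : List Char) (s : Nat) (last : PySem.Dict Char Int),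
    s ≤ pre.length →
    (pre.drop s).Nodup →
    (pre = [] ∨ (pre.length : Int) - (s : Int) < amount) →
    LastInv pre last →
    markerLoopA amount rest (pre.length : Int) (pre.drop s)
      = markerLoopB amount rest (pre.length : Int) last (s : Int) := by
  induction rest with
  | nil => intros; rfl
  | cons c rest ih =>
    intro pre s last hs hnd hlen hinv
    by_cases hmem : c ∈ pre.drop s
    · -- duplicate: A cuts the window after the first occurrence of c;
      -- B moves start past the last-seen position of c — the same position, since the window has no duplicates
      obtain ⟨j, hj, hlast⟩ := exists_last_occ (List.mem_of_mem_drop hmem)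
      have hjlt : j < pre.length := (List.getElem?_eq_some_iff.mp hj).1
      obtain ⟨m, hmlt, hm⟩ := List.getElem_of_mem hmem
      have hm' : pre[s+m]? = some c := by
        rw [← List.getElem?_drop]; exact List.getElem?_eq_some_iff.mpr ⟨hmlt, hm⟩
      have hsj : s ≤ j := by
        by_contra hlt
        exact hlast (s+m) (by omega) hm'
      have hget : PySem.Dict.get? last c = some (j : Int) := (hinv c j).mpr ⟨j, rfl, hj, hlast⟩
      have hdropj : (pre.drop s)[j - s]? = some c := by
        rw [List.getElem?_drop, Nat.add_sub_cancel' hsj]; exact hj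
      have hjs : j - s < (pre.drop s).length := (List.getElem?_eq_some_iff.mp hdropj).1
      have hdropj' : (pre.drop s)[j - s]'hjs = c := (List.getElem?_eq_some_iff.mp hdropj).2
      have hidx : PySem.List.index? (pre.drop s ++ [c]) c = some (j - s) := by
        rw [PySem.List.index?_eq_idxOf?]
        refine List.idxOf?_eq_some_iff.mpr ⟨by simp; omega, ?_, ?_⟩
        · rw [List.getElem_append_left hjs]; exact hdropj'
        · intro k hk hck
          have hkl : k < (pre.drop s).length := by omega
          rw [List.getElem_append_left hkl] at hck
          have := (List.Nodup.getElem_inj_iff hnd).mp (hck.trans hdropj'.symm)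
          omega
      have hslice : PySem.List.slice (pre.drop s ++ [c]) (some (((j - s : Nat) : Int) + 1)) none
          = (pre ++ [c]).drop (j + 1) := by
        have h1 : (((j - s : Nat) : Int) + 1) = (((j - s + 1 : Nat)) : Int) := by push_cast; ring
        rw [h1, PySem.List.slice_from_natCast]
        rw [List.drop_append_of_le_length (by simp; omega)]
        rw [List.drop_drop]
        have h2 : s + (j - s + 1) = j + 1 := by omega
        rw [h2, ← List.drop_append_of_le_length (l₂ := [c]) (by omega)]
      have hnotnil : pre ≠ [] := by intro h; subst h; simp at hjlt
      have hwin : (pre.length : Int) - (s : Int) < amount := by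
        rcases hlen with h | h
        · exact absurd h hnotnil
        · exact h
      have hnoret : ¬ amount ≤ (pre.length : Int) - ((j : Int) + 1) + 1 := by
        have : (j : Int) ≥ (s : Int) := by exact_mod_cast hsj
        omega
      simp only [markerLoopA, markerLoopB, hget, if_pos hmem, hidx, Option.getD_some, hslice,
        if_pos (show (s : Int) ≤ (j : Int) by exact_mod_cast hsj), if_neg hnoret]
      have hih := ih (pre ++ [c]) (j + 1) (PySem.Dict.insert last c (pre.length : Int))
        (by simp; omega)
        (by
          have hnotmem : c ∉ pre.drop (j + 1) := by
            intro hcm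
            obtain ⟨m2, hm2lt, hm2⟩ := List.getElem_of_mem hcm
            have hocc : pre[(j + 1) + m2]? = some c := by
              rw [← List.getElem?_drop]; exact List.getElem?_eq_some_iff.mpr ⟨hm2lt, hm2⟩
            exact hlast ((j + 1) + m2) (by omega) hocc
          have h3 : (pre.drop (j + 1)).Nodup := by
            have h4 : pre.drop (j + 1) = (pre.drop s).drop (j + 1 - s) := by
              rw [List.drop_drop]; congr 1; omega
            rw [h4]; exact (List.drop_sublist _ _).nodup hnd
          rw [List.drop_append_of_le_length (by omega), List.nodup_append]
          refine ⟨h3, List.nodup_singleton c, fun a ha b hb => ?_⟩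
          simp only [List.mem_singleton] at hb
          subst hb
          intro heq; subst heq; exact hnotmem ha)
        (Or.inr (by simp; omega))
        (lastInv_step hinv c)
      have hc1 : (((pre ++ [c]).length : Nat) : Int) = (pre.length : Int) + 1 := by simp
      have hc2 : (((j + 1 : Nat)) : Int) = (j : Int) + 1 := by push_cast; ring
      rw [hc1, hc2] at hih
      exact hih
    · -- new character: the window start does not move
      have hstart : (match PySem.Dict.get? last c with
          | some p => if (s : Int) ≤ p then p + 1 else (s : Int)
          | none => (s : Int)) = (s : Int) := by
        cases hg : PySem.Dict.get? last c with
        | none => rfl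
        | some p =>
          obtain ⟨j, rfl, hj, hlast⟩ := (hinv c p).mp hg
          have hjlt : j < pre.length := (List.getElem?_eq_some_iff.mp hj).1
          have hns : ¬ (s : Int) ≤ (j : Int) := by
            intro hsj
            have hsj' : s ≤ j := by exact_mod_cast hsj
            have : (pre.drop s)[j - s]? = some c := by
              rw [List.getElem?_drop, Nat.add_sub_cancel' hsj']; exact hj
            exact hmem (List.mem_of_getElem? this)
          simp [hns]
      have hlen2 : (((pre.drop s ++ [c]).length : Nat) : Int) = (pre.length : Int) - s + 1 := by
        simp [List.length_drop]; push_cast [Nat.cast_sub hs]; ring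
      simp only [markerLoopA, markerLoopB, if_neg hmem, hstart, hlen2]
      by_cases hret : amount ≤ (pre.length : Int) - (s : Int) + 1
      · rw [if_neg (by omega), if_pos hret]
      · rw [if_pos (by omega), if_neg hret]
        have hdr : pre.drop s ++ [c] = (pre ++ [c]).drop s :=
          (List.drop_append_of_le_length hs).symm
        rw [hdr]
        have hih := ih (pre ++ [c]) s (PySem.Dict.insert last c (pre.length : Int))
          (by simp; omega)
          (by
            rw [List.drop_append_of_le_length hs, List.nodup_append]
            refine ⟨hnd, List.nodup_singleton c, fun a ha b hb => ?_⟩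
            simp only [List.mem_singleton] at hb
            subst hb
            intro heq; subst heq; exact hmem ha)
          (Or.inr (by simp; omega))
          (lastInv_step hinv c)
        have hc1 : (((pre ++ [c]).length : Nat) : Int) = (pre.length : Int) + 1 := by simp
        rw [hc1] at hih
        exact hih

-- ===== VERDICT (by name: the statement is the Claim_ definition above) =====
theorem marker_finder_spec : Claim_equal_marker_finder := by
  intro string amount _
  unfold Spec_marker_finder marker_finder marker_finder_alt
  have := loop_eq amount string.toList [] 0 PySem.Dict.empty (by simp) (by simp)
    (Or.inl rfl) lastInv_empty
  simpa using this
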